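-- pv_equiv track=rewrite | github.com/vonnan/Leetcode | 2289-steps-to-make-array-non-decreasing/2289-steps-to-make-array-non-decreasing.py | totalSteps
-- ===== SOURCE A (Python) =====
-- from typing import List
--
-- def totalSteps(nums: List[int]) -> int:
--     stack = [(nums[0], 0)]
--     res = 0
--
--     for i, num in enumerate(nums[1:], 1):
--         t = 0
--         while stack and stack[-1][0] <= num:
--             t = max(t, stack.pop()[1])
--
--         if stack:
--             t += 1
--         else:
--             t = 0
--
--         res = max(res, t)
--         stack.append((num, t))
--
--     return res
-- ===== SOURCE B (Python) =====
-- from typing import List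
--
-- def totalSteps(nums: List[int]) -> int:
--     # Naive round-by-round simulation: each round drops every element smaller
--     # than its left neighbour (snapshot at round start), until stable.
--     steps = 0
--     cur = list(nums)
--     while True:
--         kept = [cur[0]] + [cur[i] for i in range(1, len(cur)) if cur[i - 1] <= cur[i]]
--         if len(kept) == len(cur):
--             return steps
--         steps += 1
--         cur = kept
-- ===== Notes on version B (the rewrite author's own statement) =====
-- stated objective: alternative
-- what changed: Replaced the one-pass monotonic-stack computation of each element's removal round by a direct round-by-round simulation that repeatedly drops every element smaller than its left neighbour (on the round-start snapshot) until the list is non-decreasing, counting rounds.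
import Mathlib
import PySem

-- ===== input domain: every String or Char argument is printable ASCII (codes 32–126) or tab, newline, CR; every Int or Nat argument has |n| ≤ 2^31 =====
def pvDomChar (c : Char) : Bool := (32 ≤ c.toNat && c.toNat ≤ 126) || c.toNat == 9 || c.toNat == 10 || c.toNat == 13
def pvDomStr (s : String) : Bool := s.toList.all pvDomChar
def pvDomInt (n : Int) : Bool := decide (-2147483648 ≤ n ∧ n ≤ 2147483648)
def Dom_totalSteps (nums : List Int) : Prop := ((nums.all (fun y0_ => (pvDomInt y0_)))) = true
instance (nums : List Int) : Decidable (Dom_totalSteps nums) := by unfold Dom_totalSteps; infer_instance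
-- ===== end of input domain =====

-- B replaces A's one-pass monotonic stack by a round-by-round removal simulation
-- (alternative algorithm, not claimed faster); equivalence of return values is proved
-- on nonempty lists (both Pythons raise IndexError on []).

-- ===== PORT A =====
-- the inner `while stack and stack[-1][0] <= num: t = max(t, stack.pop()[1])`
-- (stack represented head = top)
def pvPop (stack : List (Int × Int)) (num t : Int) : List (Int × Int) × Int :=
  match stack with
  | [] => ([], t)
  | (v, d) :: rest => if v ≤ num then pvPop rest num (max t d) else ((v, d) :: rest, t)

-- one iteration of A's `for i, num in enumerate(nums[1:], 1)` body, state = (stack, res)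
def pvStep (s : List (Int × Int) × Int) (num : Int) : List (Int × Int) × Int :=
  let p := pvPop s.1 num 0
  let t : Int := if p.1 = [] then 0 else p.2 + 1
  ((num, t) :: p.1, max s.2 t)

def totalSteps (nums : List Int) : Int :=
  match nums with
  | [] => 0          -- Python raises IndexError at nums[0]; excluded by Pre_
  | x :: rest => (rest.foldl pvStep ([(x, 0)], 0)).2

-- ===== PORT B =====
-- `[cur[i] for i in range(1, len(cur)) if cur[i-1] <= cur[i]]`
def pvKeptTail (prev : Int) (l : List Int) : List Int :=
  match l with
  | [] => []
  | y :: ys => if prev ≤ y then y :: pvKeptTail y ys else pvKeptTail y ys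

-- needed by pvSimLoop's termination proof
theorem pvKeptTail_length_le (l : List Int) : ∀ prev, (pvKeptTail prev l).length ≤ l.length := by
  induction l with
  | nil => intro prev; simp [pvKeptTail]
  | cons y ys ih =>
    intro prev
    simp only [pvKeptTail]
    split
    · simpa using ih y
    · exact le_trans (ih y) (by simp)

-- `kept = [cur[0]] + [...]`
def pvKeepRound (cur : List Int) : List Int :=
  match cur with
  | [] => []         -- Python raises IndexError at cur[0]; excluded by Pre_
  | x :: rest => x :: pvKeptTail x rest

-- B's `while True:` loop
def pvSimLoop (cur : List Int) (steps : Int) : Int :=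
  if h : (pvKeepRound cur).length = cur.length then steps
  else pvSimLoop (pvKeepRound cur) (steps + 1)
termination_by cur.length
decreasing_by
  cases cur with
  | nil => simp [pvKeepRound] at h
  | cons x rest =>
    have := pvKeptTail_length_le rest x
    simp only [pvKeepRound, List.length_cons] at h ⊢
    omega

def totalSteps_alt (nums : List Int) : Int :=
  match nums with
  | [] => 0          -- Python raises IndexError at cur[0]; excluded by Pre_
  | _ :: _ => pvSimLoop nums 0

-- ===== PRECONDITION & SPEC =====
-- Pre_ excludes only the empty list, on which both A and B raise IndexError.
def Pre_totalSteps (nums : List Int) : Prop := nums ≠ []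
instance (nums : List Int) : Decidable (Pre_totalSteps nums) := by unfold Pre_totalSteps; infer_instance
def pvWitness_totalSteps : List Int := [5, 3, 4, 4, 7, 3, 6, 11, 8, 5, 11]

def Spec_totalSteps (nums : List Int) (out : Int) : Prop := out = totalSteps_alt nums
instance (nums : List Int) (out : Int) : Decidable (Spec_totalSteps nums out) := by unfold Spec_totalSteps; infer_instance

-- ===== CLAIM (what is proved, stated in full; the proofs are below) =====
def Claim_equal_totalSteps : Prop := ∀ (nums : List Int), Dom_totalSteps nums → Pre_totalSteps nums → Spec_totalSteps nums (totalSteps nums)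

-- ===== LEMMAS AND PROOFS =====

-- `pvDecD d` is the death-round relabelling after one removal round: rounds ≥ 2 shift
-- down by one, rounds 0 (never removed) and 1 (removed this round) become 0.
def pvDecD (d : Int) : Int := if d ≤ 1 then 0 else d - 1

-- stack-entry transformation after one round: entries dying this round (d = 1) vanish
def pvPhi (e : Int × Int) : Option (Int × Int) := if e.2 = 1 then none else some (e.1, pvDecD e.2)

theorem pvDecD_max (a b : Int) : pvDecD (max a b) = max (pvDecD a) (pvDecD b) := by
  rcases le_total a b with h | h <;> simp [pvDecD, max_def] <;> split_ifs <;> omega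

theorem pvPop_acc_mono (S : List (Int × Int)) : ∀ num a, a ≤ (pvPop S num a).2 := by
  induction S with
  | nil => intro num a; simp [pvPop]
  | cons e rest ih =>
    intro num a
    obtain ⟨v, d⟩ := e
    simp only [pvPop]
    split
    · exact le_trans (le_max_left a d) (ih num (max a d))
    · simp

theorem pvPop_suffix (S : List (Int × Int)) : ∀ num a, (pvPop S num a).1 <:+ S := by
  induction S with
  | nil => intro num a; simp [pvPop]
  | cons e rest ih =>
    intro num a
    obtain ⟨v, d⟩ := e
    simp only [pvPop]
    split
    · exact (ih num (max a d)).trans (List.suffix_cons (v, d) rest)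
    · exact List.suffix_rfl

theorem pvPop_head_gt (S : List (Int × Int)) : ∀ num a e, ((pvPop S num a).1).head? = some e → num < e.1 := by
  induction S with
  | nil => intro num a e h; simp [pvPop] at h
  | cons x rest ih =>
    intro num a e h
    obtain ⟨v, d⟩ := x
    simp only [pvPop] at h
    split at h
    · exact ih num (max a d) e h
    · simp only [List.head?_cons, Option.some.injEq] at h
      subst h; simp only; omega

theorem pvPop_noop (S : List (Int × Int)) (num a : Int) (h : ∀ e ∈ S, num < e.1) :
    pvPop S num a = (S, a) := by
  cases S with
  | nil => simp [pvPop]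
  | cons e rest =>
    obtain ⟨v, d⟩ := e
    have : num < v := h (v, d) (by simp)
    simp [pvPop, not_le.mpr this]

-- the ys-side pop mirrors the xs-side pop through pvPhi
theorem pvPop_phi (S : List (Int × Int)) : ∀ num a,
    List.Pairwise (fun x y => x.1 < y.1) S →
    pvPop (S.filterMap pvPhi) num (pvDecD a)
      = ((pvPop S num a).1.filterMap pvPhi, pvDecD (pvPop S num a).2) := by
  induction S with
  | nil => intro num a _; simp [pvPop]
  | cons e rest ih =>
    intro num a hpw
    obtain ⟨v, d⟩ := e
    rw [List.pairwise_cons] at hpw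
    obtain ⟨hhd, hpw'⟩ := hpw
    by_cases hvd : d = 1
    · subst hvd
      have hf : (((v, (1:Int)) :: rest).filterMap pvPhi) = rest.filterMap pvPhi := by
        simp [pvPhi]
      rw [hf]
      by_cases hle : v ≤ num
      · have hacc : pvDecD a = pvDecD (max a 1) := by
          rcases le_total a 1 with h | h <;> simp [pvDecD, max_def] <;> split_ifs <;> omega
        have hx : pvPop ((v, (1:Int)) :: rest) num a = pvPop rest num (max a 1) := by
          simp [pvPop, hle]
        rw [hx, hacc]
        exact ih num (max a 1) hpw'
      · have hall : ∀ e ∈ rest.filterMap pvPhi, num < e.1 := by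
          intro e he
          obtain ⟨b, hb, hphib⟩ := List.mem_filterMap.mp he
          have hb1 : e.1 = b.1 := by
            unfold pvPhi at hphib
            split at hphib
            · exact absurd hphib (by simp)
            · cases hphib; rfl
          have := hhd b hb
          omega
        rw [pvPop_noop _ num _ hall]
        have hx : pvPop ((v, (1:Int)) :: rest) num a = ((v, (1:Int)) :: rest, a) := by
          simp [pvPop, hle]
        rw [hx, hf]
    · have hf : (((v, d) :: rest).filterMap pvPhi) = (v, pvDecD d) :: rest.filterMap pvPhi := by
        simp [pvPhi, hvd]
      rw [hf]
      by_cases hle : v ≤ num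
      · have hx : pvPop ((v, d) :: rest) num a = pvPop rest num (max a d) := by
          simp [pvPop, hle]
        have hy : pvPop ((v, pvDecD d) :: rest.filterMap pvPhi) num (pvDecD a)
            = pvPop (rest.filterMap pvPhi) num (max (pvDecD a) (pvDecD d)) := by
          simp [pvPop, hle]
        rw [hx, hy, ← pvDecD_max]
        exact ih num (max a d) hpw'
      · have hx : pvPop ((v, d) :: rest) num a = ((v, d) :: rest, a) := by
          simp [pvPop, hle]
        have hy : pvPop ((v, pvDecD d) :: rest.filterMap pvPhi) num (pvDecD a)
            = ((v, pvDecD d) :: rest.filterMap pvPhi, pvDecD a) := by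
          simp [pvPop, hle]
        rw [hx, hy, ← hf]

theorem pvSuffix_getLast? {α : Type} {l₁ l₂ : List α} (h : l₁ <:+ l₂) (hne : l₁ ≠ []) :
    l₂.getLast? = l₁.getLast? := by
  obtain ⟨t, rfl⟩ := h
  rw [List.getLast?_append]
  cases e : l₁.getLast? with
  | none => exact absurd (List.getLast?_eq_none_iff.mp e) hne
  | some v => simp

theorem pvDecD_nonneg {r : Int} (_hr : 0 ≤ r) : 0 ≤ pvDecD r := by
  unfold pvDecD; split_ifs <;> omega

-- main invariant: running A's pass on the kept tail from the pvPhi-image state mirrors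
-- A's pass on the full tail, with res transformed by pvDecD
theorem pvMain (l : List Int) : ∀ (prev dp : Int) (Srest : List (Int × Int)) (r : Int),
    List.Pairwise (fun x y => x.1 < y.1) ((prev, dp) :: Srest) →
    (∀ e, ((prev, dp) :: Srest).getLast? = some e → e.2 = 0) →
    (∀ e ∈ ((prev, dp) :: Srest).dropLast, 1 ≤ e.2) →
    0 ≤ r →
    ((pvKeptTail prev l).foldl pvStep (((prev, dp) :: Srest).filterMap pvPhi, pvDecD r)).2
        = pvDecD ((l.foldl pvStep ((prev, dp) :: Srest, r)).2)
      ∧ r ≤ (l.foldl pvStep ((prev, dp) :: Srest, r)).2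
      ∧ (pvKeptTail prev l ≠ l → 1 ≤ (l.foldl pvStep ((prev, dp) :: Srest, r)).2) := by
  induction l with
  | nil =>
    intro prev dp Srest r _ _ _ _
    exact ⟨rfl, le_rfl, fun h => absurd rfl h⟩
  | cons num l' ih =>
    intro prev dp Srest r hpw hlast hmid hr
    have hd0 : pvDecD 0 = 0 := by decide
    by_cases hle : prev ≤ num
    · -- kept element: both passes pop
      have hpopphi := pvPop_phi ((prev, dp) :: Srest) num 0 hpw
      rw [hd0] at hpopphi
      cases hR : (pvPop ((prev, dp) :: Srest) num 0).1 with
      | nil =>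
        -- the pop empties the stack: t = 0 on both sides
        have hx : pvStep ((prev, dp) :: Srest, r) num = ([(num, 0)], r) := by
          simp [pvStep, hR, max_eq_left hr]
        have hy : pvStep (((prev, dp) :: Srest).filterMap pvPhi, pvDecD r) num
            = ([(num, 0)], pvDecD r) := by
          simp [pvStep, hpopphi, hR, max_eq_left (pvDecD_nonneg hr)]
        have hkt : pvKeptTail prev (num :: l') = num :: pvKeptTail num l' := by
          simp [pvKeptTail, hle]
        obtain ⟨ih1, ih2, ih3⟩ := ih num 0 [] r (by simp)
          (by intro e he; simp only [List.getLast?_singleton, Option.some.injEq] at he; rw [← he])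
          (by simp) hr
        have hfm : ([((num : Int), (0 : Int))].filterMap pvPhi) = [(num, 0)] := by
          simp [pvPhi, pvDecD]
        rw [hfm] at ih1
        refine ⟨?_, ?_, ?_⟩
        · rw [hkt, List.foldl_cons, List.foldl_cons, hx, hy]; exact ih1
        · rw [List.foldl_cons, hx]; exact ih2
        · intro hne
          rw [List.foldl_cons, hx]
          apply ih3
          intro h
          exact hne (by rw [hkt, h])
      | cons q R' =>
        -- stack remains nonempty: t = t0 + 1 on both sides
        have hSrest_ne : Srest ≠ [] := by
          intro h
          subst h
          simp [pvPop, hle] at hR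
        obtain ⟨s1, srest', rfl⟩ := List.exists_cons_of_ne_nil hSrest_ne
        have hdp : 1 ≤ dp := hmid (prev, dp) (by simp)
        have ht0 : 1 ≤ (pvPop ((prev, dp) :: s1 :: srest') num 0).2 := by
          have hpop1 : pvPop ((prev, dp) :: s1 :: srest') num 0
              = pvPop (s1 :: srest') num (max 0 dp) := by
            simp [pvPop, hle]
          have := pvPop_acc_mono (s1 :: srest') num (max 0 dp)
          rw [hpop1]
          omega
        have hsuf : q :: R' <:+ (prev, dp) :: s1 :: srest' := hR ▸ pvPop_suffix _ num 0
        have hlastP : ((prev, dp) :: s1 :: srest').getLast? = (q :: R').getLast? :=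
          pvSuffix_getLast? hsuf (List.cons_ne_nil q R')
        obtain ⟨e0, hgl, he2⟩ : ∃ e, (q :: R').getLast? = some e ∧ e.2 = 0 := by
          cases hgl : (q :: R').getLast? with
          | none => exact absurd (List.getLast?_eq_none_iff.mp hgl) (List.cons_ne_nil q R')
          | some e => exact ⟨e, rfl, hlast e (by rw [hlastP]; exact hgl)⟩
        have hfmne : (q :: R').filterMap pvPhi ≠ [] := by
          apply List.ne_nil_of_mem (a := (e0.1, pvDecD e0.2))
          exact List.mem_filterMap.mpr ⟨e0, List.mem_of_getLast? hgl, by simp [pvPhi, he2]⟩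
        have hx : pvStep ((prev, dp) :: s1 :: srest', r) num
            = ((num, (pvPop ((prev, dp) :: s1 :: srest') num 0).2 + 1) :: q :: R',
               max r ((pvPop ((prev, dp) :: s1 :: srest') num 0).2 + 1)) := by
          simp [pvStep, hR]
        have hy : pvStep ((((prev, dp) :: s1 :: srest').filterMap pvPhi), pvDecD r) num
            = ((num, pvDecD (pvPop ((prev, dp) :: s1 :: srest') num 0).2 + 1)
                 :: (q :: R').filterMap pvPhi,
               max (pvDecD r) (pvDecD (pvPop ((prev, dp) :: s1 :: srest') num 0).2 + 1)) := by
          simp [pvStep, hpopphi, hR, hfmne]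
        have htp : pvDecD (pvPop ((prev, dp) :: s1 :: srest') num 0).2 + 1
            = pvDecD ((pvPop ((prev, dp) :: s1 :: srest') num 0).2 + 1) := by
          unfold pvDecD; split_ifs <;> omega
        have hstate : ((num, pvDecD ((pvPop ((prev, dp) :: s1 :: srest') num 0).2 + 1))
              :: (q :: R').filterMap pvPhi)
            = (((num, (pvPop ((prev, dp) :: s1 :: srest') num 0).2 + 1) :: q :: R').filterMap
                pvPhi) := by
          have hne1 : ¬ ((pvPop ((prev, dp) :: s1 :: srest') num 0).2 + 1 = 1) := by omega
          simp [List.filterMap_cons, pvPhi, hne1]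
        have hpwP : List.Pairwise (fun x y => x.1 < y.1) (q :: R') :=
          List.Pairwise.sublist hsuf.sublist hpw
        have hheadq : num < q.1 := pvPop_head_gt _ num 0 q (by rw [hR]; rfl)
        obtain ⟨u, hu⟩ := hsuf
        obtain ⟨ih1, ih2, ih3⟩ := ih num ((pvPop ((prev, dp) :: s1 :: srest') num 0).2 + 1)
          (q :: R') (max r ((pvPop ((prev, dp) :: s1 :: srest') num 0).2 + 1))
          (by
            rw [List.pairwise_cons]
            refine ⟨?_, hpwP⟩
            intro e he
            rcases List.mem_cons.mp he with h | h
            · rw [h]; exact hheadq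
            · have := (List.pairwise_cons.mp hpwP).1 e h
              omega)
          (by
            intro e he
            rw [List.getLast?_cons_cons] at he
            exact hlast e (by rw [hlastP]; exact he))
          (by
            intro e he
            rw [List.dropLast_cons₂] at he
            rcases List.mem_cons.mp he with h | h
            · rw [h]; simp only; omega
            · apply hmid
              rw [← hu, List.dropLast_append_of_ne_nil (List.cons_ne_nil q R')]
              exact List.mem_append_right u h)
          (le_trans hr (le_max_left _ _))
        have hkt : pvKeptTail prev (num :: l') = num :: pvKeptTail num l' := by
          simp [pvKeptTail, hle]
        refine ⟨?_, ?_, ?_⟩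
        · rw [hkt, List.foldl_cons, List.foldl_cons, hx, hy, htp, hstate, ← pvDecD_max]
          exact ih1
        · rw [List.foldl_cons, hx]
          exact le_trans (le_max_left _ _) ih2
        · intro hne
          rw [List.foldl_cons, hx]
          apply ih3
          intro h
          exact hne (by rw [hkt, h])
    · -- removed element (prev > num): xs pushes (num, 1), ys skips it
      have hx : pvStep ((prev, dp) :: Srest, r) num
          = ((num, 1) :: (prev, dp) :: Srest, max r 1) := by
        simp [pvStep, pvPop, hle]
      have hstate : (((num, (1 : Int)) :: (prev, dp) :: Srest).filterMap pvPhi)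
          = (((prev, dp) :: Srest).filterMap pvPhi) := by
        simp [List.filterMap_cons, pvPhi]
      have hdr : pvDecD (max r 1) = pvDecD r := by
        rw [max_def]; unfold pvDecD; split_ifs <;> omega
      obtain ⟨ih1, ih2, ih3⟩ := ih num 1 ((prev, dp) :: Srest) (max r 1)
        (by
          rw [List.pairwise_cons]
          refine ⟨?_, hpw⟩
          intro e he
          rcases List.mem_cons.mp he with h | h
          · rw [h]; simp only; omega
          · have := (List.pairwise_cons.mp hpw).1 e h
            omega)
        (by
          intro e he
          rw [List.getLast?_cons_cons] at he
          exact hlast e he)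
        (by
          intro e he
          rw [List.dropLast_cons₂] at he
          rcases List.mem_cons.mp he with h | h
          · simp [h]
          · exact hmid e h)
        (le_trans hr (le_max_left _ _))
      have hkt : pvKeptTail prev (num :: l') = pvKeptTail num l' := by
        simp [pvKeptTail, hle]
      rw [hstate, hdr] at ih1
      refine ⟨?_, ?_, ?_⟩
      · rw [hkt, List.foldl_cons, hx]
        exact ih1
      · rw [List.foldl_cons, hx]
        exact le_trans (le_max_left _ _) ih2
      · intro _
        rw [List.foldl_cons, hx]
        exact le_trans (le_max_right _ _) ih2

-- non-decreasing lists: A returns 0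
theorem pvAsc (l : List Int) : ∀ prev, pvKeptTail prev l = l →
    (l.foldl pvStep ([(prev, 0)], 0)).2 = 0 := by
  induction l with
  | nil => intro prev _; rfl
  | cons y ys ih =>
    intro prev h
    simp only [pvKeptTail] at h
    split at h
    · rename_i hle
      rw [List.cons.injEq] at h
      have hstep : pvStep ([((prev : Int), (0 : Int))], 0) y = ([(y, 0)], 0) := by
        simp [pvStep, pvPop, hle]
      rw [List.foldl_cons, hstep]
      exact ih y h.2
    · have h1 := pvKeptTail_length_le ys y
      have h2 := congrArg List.length h
      simp at h2
      omega

theorem pvKeptTail_eq_of_length (l : List Int) : ∀ prev,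
    (pvKeptTail prev l).length = l.length → pvKeptTail prev l = l := by
  induction l with
  | nil => intro prev _; rfl
  | cons y ys ih =>
    intro prev h
    simp only [pvKeptTail] at h ⊢
    split at h
    · rename_i hle
      simp only [List.length_cons, Nat.add_right_cancel_iff] at h
      simp [hle, ih y h]
    · have := pvKeptTail_length_le ys y
      simp at h; omega

-- one round decrements A's answer (when a removal happens), and fixpoints have answer 0
theorem pvRound (x : Int) (rest : List Int) :
    totalSteps (pvKeepRound (x :: rest)) = pvDecD (totalSteps (x :: rest))
    ∧ 0 ≤ totalSteps (x :: rest)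
    ∧ (pvKeptTail x rest ≠ rest → 1 ≤ totalSteps (x :: rest)) := by
  have h := pvMain rest x 0 [] 0 (by simp) (by intro e he; simp only [List.getLast?_singleton, Option.some.injEq] at he; rw [← he])
    (by simp) le_rfl
  have hphi : ([((x : Int), (0 : Int))].filterMap pvPhi) = [(x, 0)] := by
    simp [pvPhi, pvDecD]
  have hd0 : pvDecD 0 = 0 := by simp [pvDecD]
  rw [hphi, hd0] at h
  exact ⟨by simpa [totalSteps, pvKeepRound] using h.1, h.2.1, h.2.2⟩

theorem pvSim (n : ℕ) : ∀ (xs : List Int), xs.length ≤ n → xs ≠ [] → ∀ s,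
    pvSimLoop xs s = s + totalSteps xs := by
  induction n with
  | zero =>
    intro xs hlen hne
    exact absurd (List.length_eq_zero_iff.mp (Nat.le_zero.mp hlen)) hne
  | succ n ih =>
    intro xs hlen hne s
    obtain ⟨x, rest, rfl⟩ := List.exists_cons_of_ne_nil hne
    rw [pvSimLoop]
    by_cases hfix : (pvKeepRound (x :: rest)).length = (x :: rest).length
    · rw [dif_pos hfix]
      have hk : pvKeptTail x rest = rest := by
        apply pvKeptTail_eq_of_length
        simpa [pvKeepRound] using hfix
      have h0 : totalSteps (x :: rest) = 0 := by
        simpa [totalSteps] using pvAsc rest x hk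
      rw [h0, add_zero]
    · rw [dif_neg hfix]
      have hkne : pvKeptTail x rest ≠ rest := fun he => hfix (by simp [pvKeepRound, he])
      obtain ⟨hdec, _, hge1⟩ := pvRound x rest
      have h1 : 1 ≤ totalSteps (x :: rest) := hge1 hkne
      have hlt : (pvKeptTail x rest).length ≤ rest.length := pvKeptTail_length_le rest x
      have hlen2 : (pvKeepRound (x :: rest)).length ≤ n := by
        simp only [pvKeepRound, List.length_cons] at hfix ⊢
        simp only [List.length_cons] at hlen
        omega
      rw [ih (pvKeepRound (x :: rest)) hlen2 (by simp [pvKeepRound]) (s + 1), hdec]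
      unfold pvDecD
      split_ifs <;> omega

-- ===== VERDICT (by name: the statement is the Claim_ definition above) =====
theorem totalSteps_spec : Claim_equal_totalSteps := by
  intro nums _ hpre
  unfold Spec_totalSteps
  cases nums with
  | nil => exact absurd rfl hpre
  | cons x rest =>
    have := pvSim (x :: rest).length (x :: rest) le_rfl (by simp) 0
    simp only [totalSteps_alt, this, zero_add]
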